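-- pv_equiv track=rewrite | github.com/Pedrogush/magic_online_metagame_crawler | services/deck_research_service.py | build_archetype_summary
-- ===== SOURCE A (Python) =====
-- from typing import Any
--
-- def build_archetype_summary(archetype_name: str, decks: list[dict[str, Any]]) -> str:
--     by_date: dict[str, int] = {}
--     for deck in decks:
--         date = str(deck.get("date", "")).lower()
--         by_date[date] = by_date.get(date, 0) + 1
--     latest_dates = sorted(by_date.items(), reverse=True)[:7]
--     lines = [archetype_name, "", f"Total decks loaded: {len(decks)}", ""]
--     if latest_dates:
--         lines.append("Recent activity:")
--         for day, count in latest_dates: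
--             lines.append(f"  {day}: {count} deck(s)")
--     else:
--         lines.append("No recent deck activity.")
--     return "\n".join(lines)
-- ===== SOURCE B (Python) =====
-- def _runs(sorted_dates):
--     """Run-length encode an already-sorted list into (value, run length) pairs."""
--     runs = []
--     rest = sorted_dates
--     while rest:
--         day = rest[0]
--         n = 1
--         while n < len(rest) and rest[n] == day:
--             n += 1
--         runs.append((day, n))
--         rest = rest[n:]
--     return runs
--
--
-- def build_archetype_summary(archetype_name: str, decks: list) -> str:
--     # Sort the full multiset of normalized dates descending, then run-length
--     # encode consecutive equal dates; the first 7 runs are the recent activity.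
--     dates = sorted((str(deck.get("date", "")).lower() for deck in decks), reverse=True)
--     lines = [archetype_name, "", f"Total decks loaded: {len(decks)}", ""]
--     if dates:
--         lines.append("Recent activity:")
--         for day, count in _runs(dates)[:7]:
--             lines.append(f"  {day}: {count} deck(s)")
--     else:
--         lines.append("No recent deck activity.")
--     return "\n".join(lines)
-- ===== Notes on version B (the rewrite author's own statement) =====
-- stated objective: alternative
-- what changed: B drops A's dict aggregation entirely: it sorts the whole multiset of normalized dates descending and then run-length encodes consecutive equal dates in one scan, taking the first 7 runs, instead of counting into a dict and sorting the (date, count) pairs.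
import Mathlib
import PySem

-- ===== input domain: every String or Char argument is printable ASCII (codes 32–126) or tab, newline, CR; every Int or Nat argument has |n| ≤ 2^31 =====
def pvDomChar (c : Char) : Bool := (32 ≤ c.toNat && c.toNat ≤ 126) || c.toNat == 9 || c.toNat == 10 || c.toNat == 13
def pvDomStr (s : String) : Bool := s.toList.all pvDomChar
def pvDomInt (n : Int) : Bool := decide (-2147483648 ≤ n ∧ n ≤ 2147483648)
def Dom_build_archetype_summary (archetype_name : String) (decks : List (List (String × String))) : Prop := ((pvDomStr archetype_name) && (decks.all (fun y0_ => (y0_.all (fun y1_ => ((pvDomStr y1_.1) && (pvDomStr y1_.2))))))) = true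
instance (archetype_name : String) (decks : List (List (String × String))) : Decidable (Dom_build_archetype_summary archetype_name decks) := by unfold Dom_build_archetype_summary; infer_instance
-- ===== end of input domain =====

-- B replaces A's dict-aggregate-then-sort-pairs with sort-the-whole-date-list-then-run-length-encode (same return value; objective: alternative).

-- ===== PORT A =====
def build_archetype_summary (archetype_name : String) (decks : List (List (String × String))) : String :=
  let by_date : PySem.Dict String Int :=
    decks.foldl (fun d deck =>
      let date := PySem.Str.lower ((PySem.Dict.mk deck).getD "date" "")
      d.insert date (d.getD date 0 + 1)) PySem.Dict.empty
  let latest_dates := PySem.List.slice (PySem.List.sorted2 by_date.items Prod.fst Prod.snd true) none (some 7)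
  let lines := [archetype_name, "", "Total decks loaded: " ++ PySem.Int.toStr (decks.length : Int), ""]
  let lines :=
    if latest_dates ≠ [] then
      latest_dates.foldl (fun ls p => ls ++ ["  " ++ p.1 ++ ": " ++ PySem.Int.toStr p.2 ++ " deck(s)"])
        (lines ++ ["Recent activity:"])
    else lines ++ ["No recent deck activity."]
  PySem.Str.join "\n" lines

-- ===== PORT B =====
-- run-length encoding of Source B's _runs: the inner while counting equal neighbours is
-- takeWhile/dropWhile over the same list, the outer while is the structural recursion
def pvRuns (l : List String) : List (String × Int) :=
  match l with
  | [] => []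
  | d :: rest =>
    (d, (1 + (rest.takeWhile (· == d)).length : Int)) :: pvRuns (rest.dropWhile (· == d))
termination_by l.length
decreasing_by
  simpa using Nat.lt_succ_of_le (rest.length_dropWhile_le (· == d))

def build_archetype_summary_alt (archetype_name : String) (decks : List (List (String × String))) : String :=
  let dates := PySem.List.sorted (decks.map (fun deck => PySem.Str.lower ((PySem.Dict.mk deck).getD "date" ""))) (fun x => x) true
  let lines := [archetype_name, "", "Total decks loaded: " ++ PySem.Int.toStr (decks.length : Int), ""]
  let lines :=
    if dates ≠ [] then
      (lines ++ ["Recent activity:"]) ++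
        ((pvRuns dates).take 7).map (fun p => "  " ++ p.1 ++ ": " ++ PySem.Int.toStr p.2 ++ " deck(s)")
    else lines ++ ["No recent deck activity."]
  PySem.Str.join "\n" lines

-- ===== PRECONDITION & SPEC =====
def Spec_build_archetype_summary (archetype_name : String) (decks : List (List (String × String))) (out : String) : Prop := out = build_archetype_summary_alt archetype_name decks
instance (archetype_name : String) (decks : List (List (String × String))) (out : String) : Decidable (Spec_build_archetype_summary archetype_name decks out) := by unfold Spec_build_archetype_summary; infer_instance

-- ===== CLAIM (what is proved, stated in full; the proofs are below) =====
def Claim_equal_build_archetype_summary : Prop := ∀ (archetype_name : String) (decks : List (List (String × String))), Dom_build_archetype_summary archetype_name decks → Spec_build_archetype_summary archetype_name decks (build_archetype_summary archetype_name decks)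

-- ===== LEMMAS AND PROOFS =====

-- insertBy only cares about the comparator's values on the inserted element vs members of the list
theorem insertBy_congr {α : Type} (f g : α → α → Bool) (x : α) (ys : List α)
    (h : ∀ y ∈ ys, f x y = g x y) :
    PySem.List.insertBy f x ys = PySem.List.insertBy g x ys := by
  induction ys with
  | nil => rfl
  | cons y ys ih =>
    have hxy : f x y = g x y := h y (by simp)
    rcases hg : g x y with _ | _
    · simp only [PySem.List.insertBy, hxy, hg, Bool.false_eq_true, if_false]
      rw [ih (fun z hz => h z (by simp [hz]))]
    · simp only [PySem.List.insertBy, hxy, hg, if_true]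

theorem foldl_insertBy_congr {α : Type} (f g : α → α → Bool) (l : List α) (acc : List α)
    (S : List α) (hl : ∀ x ∈ l, x ∈ S) (hacc : ∀ x ∈ acc, x ∈ S)
    (h : ∀ a ∈ S, ∀ b ∈ S, f a b = g a b) :
    l.foldl (fun acc x => PySem.List.insertBy f x acc) acc
      = l.foldl (fun acc x => PySem.List.insertBy g x acc) acc := by
  induction l generalizing acc with
  | nil => rfl
  | cons x xs ih =>
    simp only [List.foldl_cons]
    rw [insertBy_congr f g x acc (fun y hy => h x (hl x (by simp)) y (hacc y hy))]
    refine ih _ (fun z hz => hl z (by simp [hz])) ?_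
    intro z hz
    rcases (PySem.List.mem_insertBy g x z acc).mp hz with rfl | hz
    · exact hl z (by simp)
    · exact hacc z hz

-- Python's sorted(list_of_pairs, reverse=True) on a list with pairwise-distinct first components
-- is the same as sorting by the first component alone
theorem sorted2_fst_snd_eq_sorted_fst (l : List (String × Int))
    (hinj : ∀ a ∈ l, ∀ b ∈ l, a.1 = b.1 → a = b) :
    PySem.List.sorted2 l Prod.fst Prod.snd true = PySem.List.sorted l Prod.fst true := by
  simp only [PySem.List.sorted2, PySem.List.sorted]
  apply foldl_insertBy_congr _ _ l [] l (fun x hx => hx) (by simp)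
  intro a ha b hb
  by_cases hab : a = b
  · subst hab; simp
  · have hne : a.1 ≠ b.1 := fun hfst => hab (hinj a ha b hb hfst)
    rcases lt_trichotomy a.1 b.1 with hlt | heq | hgt
    · simp [hlt, lt_asymm hlt]
    · exact absurd heq hne
    · simp [hgt, lt_asymm hgt]

-- A's latest_dates, rewritten through the counter characterisation
theorem latest_eq (dates : List String) :
    PySem.List.slice (PySem.List.sorted2 (PySem.Dict.counter dates).items Prod.fst Prod.snd true) none (some 7)
      = ((PySem.List.sorted (PySem.Set.ofList dates) (fun x => x) true).take 7).map
          (fun day => (day, (dates.count day : Int))) := by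
  have hitems := PySem.Dict.items_counter dates
  have hinj : ∀ a ∈ (PySem.Dict.counter dates).items, ∀ b ∈ (PySem.Dict.counter dates).items,
      a.1 = b.1 → a = b := by
    rw [hitems]
    rintro a ha b hb h1
    simp only [List.mem_map] at ha hb
    obtain ⟨k1, _, rfl⟩ := ha
    obtain ⟨k2, _, rfl⟩ := hb
    simp_all
  have hsorted : PySem.List.sorted (PySem.Dict.counter dates).items Prod.fst true
      = (PySem.List.sorted (PySem.Set.ofList dates) (fun x => x) true).map
          (fun k => (k, (dates.count k : Int))) := by
    apply PySem.List.sorted_rev_eq_of_perm_of_pairwise_gt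
    · rw [hitems]
      exact (PySem.List.sorted_perm _ _ _).map _
    · rw [List.pairwise_map]
      have hle := PySem.List.sorted_pairwise_rev (PySem.Set.ofList dates) (fun x => x)
      have hnd : (PySem.List.sorted (PySem.Set.ofList dates) (fun x => x) true).Nodup :=
        ((PySem.List.sorted_perm _ _ _).symm).nodup (PySem.Set.nodup_ofList dates)
      exact (hle.and hnd).imp (fun h => lt_of_le_of_ne h.1 (Ne.symm h.2))
  rw [PySem.List.slice_to _ (by norm_num),
      sorted2_fst_snd_eq_sorted_fst _ hinj, hsorted, List.map_take,
      show Int.toNat 7 = 7 from rfl]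

-- keys of the run-length encoding (proof-only helper)
def pvKeys (l : List String) : List String := (pvRuns l).map Prod.fst

theorem pvKeys_cons (d : String) (rest : List String) :
    pvKeys (d :: rest) = d :: pvKeys (rest.dropWhile (· == d)) := by
  simp [pvKeys, pvRuns]

-- membership in the run keys is membership in the list (takeWhile (== d) only drops copies of d)
theorem mem_pvKeys (l : List String) (x : String) :
    x ∈ pvKeys l ↔ x ∈ l := by
  induction l using pvRuns.induct with
  | case1 => simp [pvKeys, pvRuns]
  | case2 d rest ih =>
    have hsplit : rest = rest.takeWhile (· == d) ++ rest.dropWhile (· == d) :=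
      (List.takeWhile_append_dropWhile).symm
    rw [pvKeys_cons]
    constructor
    · intro hx
      rcases List.mem_cons.mp hx with rfl | hx
      · simp
      · exact List.mem_cons_of_mem _ ((List.dropWhile_sublist _).subset (ih.mp hx))
    · intro hx
      rcases List.mem_cons.mp hx with rfl | hx
      · simp
      · rw [hsplit] at hx
        rcases List.mem_append.mp hx with hx | hx
        · have : x = d := by simpa using List.mem_takeWhile_imp hx
          simp [this]
        · exact List.mem_cons_of_mem _ (ih.mpr hx)

-- on a descending list the run keys are strictly decreasing
theorem pvKeys_pairwise (l : List String) (h : l.Pairwise (fun a b => b ≤ a)) :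
    (pvKeys l).Pairwise (fun a b => b < a) := by
  induction l using pvRuns.induct with
  | case1 => simp [pvKeys, pvRuns]
  | case2 d rest ih =>
    have hsplit : rest = rest.takeWhile (· == d) ++ rest.dropWhile (· == d) :=
      (List.takeWhile_append_dropWhile).symm
    have hrest : rest.Pairwise (fun a b => b ≤ a) := h.of_cons
    have hdrop : (rest.dropWhile (· == d)).Pairwise (fun a b => b ≤ a) :=
      hrest.sublist (List.dropWhile_sublist _)
    have hlt : ∀ x ∈ rest.dropWhile (· == d), x < d := by
      intro x hx
      have hle : x ≤ d :=
        List.rel_of_pairwise_cons h ((List.dropWhile_sublist _).subset hx)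
      rcases eq_or_lt_of_le hle with rfl | hlt
      · -- an element of dropWhile (· == x) equal to x contradicts the failing head test
        exfalso
        rcases hd : rest.dropWhile (· == x) with _ | ⟨y, ys⟩
        · rw [hd] at hx; simp at hx
        · have hy : ¬ (y == x) = true := by
            have := List.head?_dropWhile_not (p := (· == x)) (l := rest)
            rw [hd] at this; simpa using this
          rw [hd] at hx hdrop
          rcases List.mem_cons.mp hx with rfl | hx2
          · simp at hy
          · have hyx : x ≤ y := List.rel_of_pairwise_cons hdrop hx2
            have hxy : y ≤ x := by
              refine List.rel_of_pairwise_cons h ?_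
              have : y ∈ rest.dropWhile (· == x) := by rw [hd]; simp
              exact (List.dropWhile_sublist _).subset this
            have : y = x := le_antisymm hxy hyx
            simp [this] at hy
      · exact hlt
    rw [pvKeys_cons]
    refine List.pairwise_cons.mpr ⟨?_, ih hdrop⟩
    intro k hk
    exact hlt k ((mem_pvKeys _ k).mp hk)

-- run-length encoding of a descending list = its keys paired with full-list counts
theorem pvRuns_eq_map_count (l : List String) (h : l.Pairwise (fun a b => b ≤ a)) :
    pvRuns l = (pvKeys l).map (fun k => (k, (l.count k : Int))) := by
  induction l using pvRuns.induct with
  | case1 => simp [pvKeys, pvRuns]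
  | case2 d rest ih =>
    have hsplit : rest = rest.takeWhile (· == d) ++ rest.dropWhile (· == d) :=
      (List.takeWhile_append_dropWhile).symm
    have hrest : rest.Pairwise (fun a b => b ≤ a) := h.of_cons
    have hdrop : (rest.dropWhile (· == d)).Pairwise (fun a b => b ≤ a) :=
      hrest.sublist (List.dropWhile_sublist _)
    have hlt : ∀ x ∈ rest.dropWhile (· == d), x < d := by
      have hp := pvKeys_pairwise (d :: rest) h
      rw [pvKeys_cons] at hp
      intro x hx
      exact (List.pairwise_cons.mp hp).1 x ((mem_pvKeys _ x).mpr hx)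
    have htake : ∀ x ∈ rest.takeWhile (· == d), x = d := by
      intro x hx
      simpa using List.mem_takeWhile_imp hx
    have hcount_d : ((d :: rest).count d : Int) = 1 + (rest.takeWhile (· == d)).length := by
      have h1 : (rest.takeWhile (· == d)).count d = (rest.takeWhile (· == d)).length :=
        List.count_eq_length.mpr (fun x hx => ((htake x hx) ▸ rfl))
      have h2 : (rest.dropWhile (· == d)).count d = 0 :=
        List.count_eq_zero.mpr (fun hd => lt_irrefl d (hlt d hd))
      have hr : rest.count d
          = (rest.takeWhile (· == d)).count d + (rest.dropWhile (· == d)).count d := by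
        conv_lhs => rw [hsplit]
        rw [List.count_append]
      have : (d :: rest).count d = 1 + (rest.takeWhile (· == d)).length := by
        rw [List.count_cons_self, hr, h1, h2]
        omega
      exact_mod_cast this
    have hcount_k : ∀ k ∈ rest.dropWhile (· == d),
        (rest.dropWhile (· == d)).count k = (d :: rest).count k := by
      intro k hk
      have hkd : k ≠ d := ne_of_lt (hlt k hk)
      have h1 : (rest.takeWhile (· == d)).count k = 0 :=
        List.count_eq_zero.mpr (fun hkt => hkd (htake k hkt))
      have hr : rest.count k
          = (rest.takeWhile (· == d)).count k + (rest.dropWhile (· == d)).count k := by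
        conv_lhs => rw [hsplit]
        rw [List.count_append]
      have hbeq : (d == k) = false := by simpa using (Ne.symm hkd : d ≠ k)
      rw [List.count_cons, hr, h1, hbeq]
      simp
    rw [pvKeys_cons]
    show pvRuns (d :: rest) = _
    rw [pvRuns]
    simp only [List.map_cons, List.cons.injEq]
    refine ⟨by rw [hcount_d], ?_⟩
    rw [ih hdrop]
    apply List.map_congr_left
    intro k hk
    have hkmem := (mem_pvKeys _ k).mp hk
    simp only [Prod.mk.injEq, true_and]
    exact_mod_cast hcount_k k hkmem

theorem ofList_eq_nil_iff (ds : List String) : PySem.Set.ofList ds = [] ↔ ds = [] := by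
  constructor
  · intro h
    by_contra hne
    obtain ⟨x, hx⟩ := List.exists_mem_of_ne_nil ds hne
    have : x ∈ PySem.Set.ofList ds := (PySem.Set.mem_ofList ds x).mpr hx
    rw [h] at this; simp at this
  · intro h; subst h; rfl

-- B's runs over sorted(dates, reverse=True) are exactly the sorted distinct dates with their counts
theorem pvRuns_sorted_eq (dates : List String) :
    pvRuns (PySem.List.sorted dates (fun x => x) true)
      = (PySem.List.sorted (PySem.Set.ofList dates) (fun x => x) true).map
          (fun k => (k, (dates.count k : Int))) := by
  set s := PySem.List.sorted dates (fun x => x) true with hs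
  have hpw : s.Pairwise (fun a b => b ≤ a) := by
    have := PySem.List.sorted_pairwise_rev dates (fun x => x)
    simpa [hs] using this
  have hkeys : PySem.List.sorted (PySem.Set.ofList dates) (fun x => x) true = pvKeys s := by
    apply PySem.List.sorted_rev_eq_of_perm_of_pairwise_gt
    · apply (List.perm_ext_iff_of_nodup ?_ ?_).mpr
      · intro x
        rw [mem_pvKeys]
        simp [hs, PySem.List.mem_sorted, PySem.Set.mem_ofList]
      · exact List.Pairwise.imp (fun h => ne_of_gt h) (pvKeys_pairwise s hpw)
      · exact PySem.Set.nodup_ofList dates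
    · exact pvKeys_pairwise s hpw
  have hcount : ∀ k, s.count k = dates.count k := fun k =>
    (PySem.List.sorted_perm dates (fun x => x) true).count_eq k
  rw [pvRuns_eq_map_count s hpw, ← hkeys]
  apply List.map_congr_left
  intro k _
  simp [hcount k]

theorem foldl_lines (latest : List (String × Int)) (init : List String) :
    latest.foldl (fun ls p => ls ++ ["  " ++ p.1 ++ ": " ++ PySem.Int.toStr p.2 ++ " deck(s)"]) init
      = init ++ latest.map (fun p => "  " ++ p.1 ++ ": " ++ PySem.Int.toStr p.2 ++ " deck(s)") := by
  induction latest generalizing init with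
  | nil => simp
  | cons p ps ih => simp [ih]

-- ===== VERDICT (by name: the statement is the Claim_ definition above) =====
theorem build_archetype_summary_spec : Claim_equal_build_archetype_summary := by
  intro archetype_name decks _
  unfold Spec_build_archetype_summary build_archetype_summary build_archetype_summary_alt
  have hfold : decks.foldl (fun d deck =>
      let date := PySem.Str.lower ((PySem.Dict.mk deck).getD "date" "")
      d.insert date (d.getD date 0 + 1)) PySem.Dict.empty
      = PySem.Dict.counter (decks.map (fun deck => PySem.Str.lower ((PySem.Dict.mk deck).getD "date" ""))) := by
    rw [← PySem.Dict.foldl_insert_getD_add_one_eq_counter, List.foldl_map]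
  set ds := decks.map (fun deck => PySem.Str.lower ((PySem.Dict.mk deck).getD "date" "")) with hds
  have hA := latest_eq ds
  have hB := pvRuns_sorted_eq ds
  simp only [hfold, hA]
  rw [show (pvRuns (PySem.List.sorted ds (fun x => x) true)).take 7
      = ((PySem.List.sorted (PySem.Set.ofList ds) (fun x => x) true).take 7).map
          (fun k => (k, (ds.count k : Int))) by rw [hB, List.map_take]]
  by_cases hd : ds = []
  · rw [if_neg (by simp [List.take_eq_nil_iff, PySem.List.sorted_eq_nil_iff, hd]),
      if_neg (by simp [PySem.List.sorted_eq_nil_iff, hd])]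
  · rw [if_pos (by simp [List.take_eq_nil_iff, PySem.List.sorted_eq_nil_iff,
        ofList_eq_nil_iff, hd]), if_pos (by simp [PySem.List.sorted_eq_nil_iff, hd]),
      foldl_lines]
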